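-- pv_equiv track=rewrite | github.com/greatertomi/problem-solving | hackerrank-challenges/easy2/gem-stone.py | gemStones
-- ===== SOURCE A (Python) =====
-- def gemStones(arr):
--     gemDict = {}
--     for val in arr:
--         newStr = list(set(val))
--         for num in newStr:
--             if num in gemDict:
--                 gemDict[num] += 1
--             else:
--                 gemDict[num] = 1
--     return list(gemDict.values()).count(len(arr))
-- ===== SOURCE B (Python) =====
-- def gemStones(arr):
--     if not arr:
--         return 0
--     common = set(arr[0])
--     for s in arr[1:]:
--         common &= set(s)
--     return len(common)
-- ===== Notes on version B (the rewrite author's own statement) =====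
-- stated objective: idiomatic
-- what changed: replaces the per-character occurrence-count dict plus the final count-of-values-equal-to-len(arr) pass with a single shrinking set intersection over the strings
import Mathlib
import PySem

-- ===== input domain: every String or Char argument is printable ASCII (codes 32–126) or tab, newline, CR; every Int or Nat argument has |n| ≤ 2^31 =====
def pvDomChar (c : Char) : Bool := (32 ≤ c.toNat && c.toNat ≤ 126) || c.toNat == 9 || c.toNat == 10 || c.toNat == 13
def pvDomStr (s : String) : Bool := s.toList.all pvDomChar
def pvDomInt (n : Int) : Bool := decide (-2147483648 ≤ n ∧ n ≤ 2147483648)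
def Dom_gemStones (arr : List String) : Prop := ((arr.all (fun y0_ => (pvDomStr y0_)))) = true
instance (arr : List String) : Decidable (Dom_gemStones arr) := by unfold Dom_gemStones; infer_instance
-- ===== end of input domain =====

-- B replaces A's per-character occurrence-count dict (and the final count of values equal
-- to len(arr)) with a single shrinking set intersection; same asymptotic cost, more idiomatic.

-- ===== PORT A =====
def gemStones (arr : List String) : Int :=
  let gemDict := arr.foldl (fun d val =>
    let newStr := PySem.Set.ofList val.toList
    newStr.foldl (fun (d : PySem.Dict Char Int) num =>
      if d.contains num then d.modify num 0 (· + 1) else d.insert num 1) d)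
    PySem.Dict.empty
  ((PySem.List.count gemDict.values ((arr.length : Int)) : Nat) : Int)

-- ===== PORT B =====
def gemStones_alt (arr : List String) : Int :=
  match arr with
  | [] => 0
  | h :: t =>
    let common := t.foldl (fun c s => PySem.Set.inter c (PySem.Set.ofList s.toList))
      (PySem.Set.ofList h.toList)
    PySem.Set.len common

-- ===== PRECONDITION & SPEC =====
def Spec_gemStones (arr : List String) (out : Int) : Prop := out = gemStones_alt arr
instance (arr : List String) (out : Int) : Decidable (Spec_gemStones arr out) := by unfold Spec_gemStones; infer_instance

-- ===== CLAIM (what is proved, stated in full; the proofs are below) =====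
def Claim_equal_gemStones : Prop := ∀ (arr : List String), Dom_gemStones arr → Spec_gemStones arr (gemStones arr)

-- ===== LEMMAS AND PROOFS =====

-- A's inner loop body is exactly "count this char once more".
theorem stepA_eq :
    (fun (d : PySem.Dict Char Int) num =>
      if d.contains num then d.modify num 0 (· + 1) else d.insert num 1)
      = fun d num => d.insert num (d.getD num 0 + 1) := by
  funext d num
  by_cases h : d.contains num = true
  · simp [h, PySem.Dict.modify]
  · simp [PySem.Dict.getD_of_not_contains, Bool.of_not_eq_true h]

theorem nodup_count_ite {l : List Char} (h : l.Nodup) (c : Char) :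
    l.count c = if c ∈ l then 1 else 0 := by
  split_ifs with hm
  · exact List.count_eq_one_of_mem h hm
  · exact List.count_eq_zero.mpr hm

-- getD of A's dict after the whole loop = number of strings of arr containing c.
theorem getD_gemDict (arr : List String) (d : PySem.Dict Char Int) (c : Char) :
    (arr.foldl (fun d val =>
        (PySem.Set.ofList val.toList).foldl
          (fun (d : PySem.Dict Char Int) x => d.insert x (d.getD x 0 + 1)) d) d).getD c 0
      = d.getD c 0 + (arr.countP (fun s => decide (c ∈ s.toList)) : Int) := by
  induction arr generalizing d with
  | nil => simp
  | cons h t ih =>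
    simp only [List.foldl_cons, List.countP_cons, ih,
      PySem.Dict.getD_foldl_insert_add_one,
      nodup_count_ite (PySem.Set.nodup_ofList h.toList) c, PySem.Set.mem_ofList]
    by_cases hm : c ∈ h.toList <;> simp [hm] <;> omega

-- keys of A's dict after the loop.
theorem keys_gemDict (arr : List String) (d : PySem.Dict Char Int) :
    (arr.foldl (fun d val =>
        (PySem.Set.ofList val.toList).foldl
          (fun (d : PySem.Dict Char Int) x => d.insert x (d.getD x 0 + 1)) d) d).keys
      = arr.foldl (fun K val => PySem.Set.update K (PySem.Set.ofList val.toList)) d.keys := by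
  induction arr generalizing d with
  | nil => rfl
  | cons h t ih =>
    simp only [List.foldl_cons, ih, PySem.Dict.keys_foldl_insert]

theorem nodup_K (arr : List String) (K : List Char) (h : K.Nodup) :
    (arr.foldl (fun K val => PySem.Set.update K (PySem.Set.ofList val.toList)) K).Nodup := by
  induction arr generalizing K with
  | nil => exact h
  | cons s t ih => exact ih _ (PySem.Set.nodup_update _ _ h)

theorem mem_K (arr : List String) (K : List Char) (c : Char) :
    c ∈ arr.foldl (fun K val => PySem.Set.update K (PySem.Set.ofList val.toList)) K
      ↔ c ∈ K ∨ ∃ s ∈ arr, c ∈ s.toList := by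
  induction arr generalizing K with
  | nil => simp
  | cons s t ih =>
    simp only [List.foldl_cons, ih, PySem.Set.mem_update, PySem.Set.mem_ofList,
      List.mem_cons]
    constructor
    · rintro ((h | h) | ⟨x, hx, hc⟩)
      · exact Or.inl h
      · exact Or.inr ⟨s, Or.inl rfl, h⟩
      · exact Or.inr ⟨x, Or.inr hx, hc⟩
    · rintro (h | ⟨x, (rfl | hx), hc⟩)
      · exact Or.inl (Or.inl h)
      · exact Or.inl (Or.inr hc)
      · exact Or.inr ⟨x, hx, hc⟩

-- B's intersection loop is a filter.
theorem inter_ofList (S : List Char) (l : List Char) :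
    PySem.Set.inter S (PySem.Set.ofList l) = S.filter (fun c => decide (c ∈ l)) := by
  simp [PySem.Set.inter, PySem.Set.mem_ofList]

theorem foldl_inter (t : List String) (S : List Char) :
    t.foldl (fun c s => PySem.Set.inter c (PySem.Set.ofList s.toList)) S
      = S.filter (fun c => decide (∀ s ∈ t, c ∈ s.toList)) := by
  induction t generalizing S with
  | nil => simp
  | cons s t ih =>
    rw [List.foldl_cons, ih, inter_ofList, List.filter_filter]
    apply List.filter_congr
    intro c _
    simp only [List.mem_cons, forall_eq_or_imp, Bool.decide_and, Bool.and_comm]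

-- ===== VERDICT (by name: the statement is the Claim_ definition above) =====
theorem gemStones_spec : Claim_equal_gemStones := by
  intro arr _
  unfold Spec_gemStones gemStones gemStones_alt
  rw [stepA_eq]
  match arr with
  | [] => simp
  | h :: t =>
    simp only []
    rw [foldl_inter]
    have hkeys := keys_gemDict (h :: t) PySem.Dict.empty
    have hnd : ((h :: t).foldl (fun d val =>
        (PySem.Set.ofList val.toList).foldl
          (fun (d : PySem.Dict Char Int) x => d.insert x (d.getD x 0 + 1)) d)
        PySem.Dict.empty).keys.Nodup := by
      rw [hkeys]; exact nodup_K _ _ (by simp)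
    rw [PySem.List.count_eq, List.count_eq_countP,
      PySem.Dict.values_eq_map_keys _ hnd 0, List.countP_map, hkeys]
    have hcount : ∀ k : Char,
        (((h :: t).foldl (fun d val =>
            (PySem.Set.ofList val.toList).foldl
              (fun (d : PySem.Dict Char Int) x => d.insert x (d.getD x 0 + 1)) d)
            PySem.Dict.empty).getD k 0 == (((h :: t).length : Nat) : Int))
          = decide (∀ s ∈ h :: t, k ∈ s.toList) := by
      intro k
      rw [getD_gemDict]
      simp only [PySem.Dict.getD_empty, zero_add, beq_eq_decide, Nat.cast_inj]
      have hiff : List.countP (fun s => decide (k ∈ s.toList)) (h :: t) = (h :: t).length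
          ↔ ∀ s ∈ h :: t, k ∈ s.toList := by
        constructor
        · intro he s hs
          simpa using List.countP_eq_length.mp he s hs
        · intro hall
          exact List.countP_eq_length.mpr (fun s hs => by simpa using hall s hs)
      calc decide (List.countP (fun s => decide (k ∈ s.toList)) (h :: t) = (h :: t).length)
          = decide (∀ s ∈ h :: t, k ∈ s.toList) := by rw [decide_eq_decide]; exact hiff
        _ = _ := by simp
    have hfun : ((fun v => v == (((h :: t).length : Nat) : Int)) ∘ fun k =>
        ((h :: t).foldl (fun d val =>
            (PySem.Set.ofList val.toList).foldl
              (fun (d : PySem.Dict Char Int) x => d.insert x (d.getD x 0 + 1)) d)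
            PySem.Dict.empty).getD k 0)
        = fun k => decide (∀ s ∈ h :: t, k ∈ s.toList) := by
      funext k; exact hcount k
    rw [hfun, List.countP_eq_length_filter]
    simp only [PySem.Set.len, PySem.Dict.keys_empty]
    congr 1
    apply List.Perm.length_eq
    rw [List.perm_ext_iff_of_nodup
      ((nodup_K (h :: t) [] List.nodup_nil).filter _)
      ((PySem.Set.nodup_ofList h.toList).filter _)]
    intro c
    simp only [List.mem_filter, mem_K, PySem.Set.mem_ofList, List.mem_cons,
      List.not_mem_nil, false_or, decide_eq_true_eq]
    constructor
    · rintro ⟨-, hall⟩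
      exact ⟨hall h (Or.inl rfl), fun s hs => hall s (Or.inr hs)⟩
    · rintro ⟨hh, hall⟩
      exact ⟨⟨h, Or.inl rfl, hh⟩, fun s hs => by
        rcases hs with rfl | hs
        · exact hh
        · exact hall s hs⟩
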